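-- pv_equiv track=rewrite | github.com/miliar/Code_Jam_Webscraper | Solutions_python/Problem_181/1475.py | solve
-- ===== SOURCE A (Python) =====
-- def solve(s) :
-- 	if len(s) == 1 :
-- 		return s
-- 	head, tail = (solve(s[:-1]), s[-1])
-- 	if head[0] > tail :
-- 		return head + tail
-- 	else :
-- 		return tail + head
-- ===== SOURCE B (Python) =====
-- def solve(s):
--     front = s[0]
--     fronts = [s[0]]
--     backs = []
--     for c in s[1:]:
--         if front > c:
--             backs.append(c)
--         else:
--             front = c
--             fronts.append(c)
--     return ''.join(reversed(fronts)) + ''.join(backs)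
-- ===== Notes on version B (the rewrite author's own statement) =====
-- stated objective: faster
-- what changed: Replaced the O(n^2) right-recursion that rebuilds the string at each step with a single left-to-right pass keeping the running front character and two append-only lists joined once at the end.
-- outside the precondition, e.g. on solve(''): A raises RecursionError, B raises IndexError
import Mathlib
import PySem

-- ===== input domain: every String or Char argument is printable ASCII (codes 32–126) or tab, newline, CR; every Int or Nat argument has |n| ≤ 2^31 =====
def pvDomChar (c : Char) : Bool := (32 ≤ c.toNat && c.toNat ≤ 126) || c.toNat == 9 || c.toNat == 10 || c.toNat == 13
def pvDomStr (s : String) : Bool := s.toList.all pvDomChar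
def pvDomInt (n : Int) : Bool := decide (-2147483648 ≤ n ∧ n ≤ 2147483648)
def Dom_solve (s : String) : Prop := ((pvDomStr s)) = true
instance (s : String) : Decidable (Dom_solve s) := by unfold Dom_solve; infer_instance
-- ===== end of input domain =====

-- B replaces A's quadratic right-recursion (rebuilding the string each step) with one
-- left-to-right pass keeping the running front char and two lists, joined once (faster).

-- ===== PORT A =====
-- A's recursion: if len(s)==1 return s; head = solve(s[:-1]); tail = s[-1];
-- if head[0] > tail: head+tail else tail+head.  On [] Python A recurses forever
-- (RecursionError); that input is excluded by Pre_solve, the [] branch value is arbitrary.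
def solveCore : List Char → List Char
  | [] => []
  | [c] => [c]
  | a :: b :: rest =>
    let head := solveCore (List.dropLast (a :: b :: rest))
    let tail := ((a :: b :: rest).getLast?).getD a   -- s[-1]; the list is nonempty so getD's default is unused
    if head.headD tail > tail then head ++ [tail] else tail :: head
termination_by l => l.length
decreasing_by simp

def solve (s : String) : String := String.ofList (solveCore s.toList)

-- ===== PORT B =====
-- one pass: state = (front, fronts, backs); append to backs when front > c, else new front.
def solveAltStep (st : Char × List Char × List Char) (c : Char) : Char × List Char × List Char :=
  if st.1 > c then (st.1, st.2.1, st.2.2 ++ [c]) else (c, st.2.1 ++ [c], st.2.2)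

def solve_alt (s : String) : String :=
  match s.toList with
  | [] => ""   -- Python B raises IndexError on "" (s[0]); excluded by Pre_solve
  | c :: rest =>
    let st := rest.foldl solveAltStep (c, [c], [])
    String.ofList (st.2.1.reverse ++ st.2.2)

-- ===== PRECONDITION & SPEC =====
-- Pre_ excludes only the empty string, on which A never returns (infinite recursion,
-- RecursionError) and B raises IndexError.
def Pre_solve (s : String) : Prop := s ≠ ""
instance (s : String) : Decidable (Pre_solve s) := by unfold Pre_solve; infer_instance
def pvWitness_solve : String := "ba"

def Spec_solve (s : String) (out : String) : Prop := out = solve_alt s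
instance (s : String) (out : String) : Decidable (Spec_solve s out) := by unfold Spec_solve; infer_instance

-- ===== CLAIM (what is proved, stated in full; the proofs are below) =====
def Claim_equal_solve : Prop := ∀ (s : String), Dom_solve s → Pre_solve s → Spec_solve s (solve s)

-- ===== LEMMAS AND PROOFS =====

-- left-to-right reformulation of A used only in the proofs
def goA (acc : List Char) : List Char → List Char
  | [] => acc
  | c :: cs => goA (if acc.headD c > c then acc ++ [c] else c :: acc) cs

theorem solveCore_append (l : List Char) (c : Char) (h : l ≠ []) :
    solveCore (l ++ [c]) =
      (if (solveCore l).headD c > c then solveCore l ++ [c] else c :: solveCore l) := by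
  match l with
  | [a] => simp [solveCore]
  | a :: b :: rest =>
    rw [show (a :: b :: rest) ++ [c] = a :: b :: (rest ++ [c]) by simp]
    conv_lhs => rw [solveCore]
    simp only [show a :: b :: (rest ++ [c]) = (a :: b :: rest) ++ [c] by simp,
      List.dropLast_concat, List.getLast?_concat, Option.getD_some]

theorem goA_append (acc rest : List Char) (c : Char) :
    goA acc (rest ++ [c]) =
      (if (goA acc rest).headD c > c then goA acc rest ++ [c] else c :: goA acc rest) := by
  induction rest generalizing acc with
  | nil => simp [goA]
  | cons x xs ih => simp [goA, ih]

theorem solveCore_eq_goA (c0 : Char) (rest : List Char) :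
    solveCore (c0 :: rest) = goA [c0] rest := by
  induction rest using List.reverseRecOn with
  | nil => simp [solveCore, goA]
  | append_singleton xs x ih =>
    rw [show c0 :: (xs ++ [x]) = (c0 :: xs) ++ [x] by simp,
        solveCore_append _ _ (by simp), goA_append, ih]

theorem foldl_step_eq_goA (rest : List Char) (front : Char) (fronts backs : List Char)
    (hinv : fronts.reverse.head? = some front) :
    (rest.foldl solveAltStep (front, fronts, backs)).2.1.reverse
      ++ (rest.foldl solveAltStep (front, fronts, backs)).2.2
      = goA (fronts.reverse ++ backs) rest := by
  induction rest generalizing front fronts backs with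
  | nil => simp [goA]
  | cons c cs ih =>
    have hhd : (fronts.reverse ++ backs).headD c = front := by
      cases hfr : fronts.reverse with
      | nil => simp [hfr] at hinv
      | cons y ys => simp [hfr] at hinv ⊢; exact hinv
    simp only [List.foldl_cons, goA, hhd, solveAltStep]
    by_cases hc : front > c
    · simp only [hc, if_pos]
      rw [ih _ _ _ hinv]
      congr 1
      simp
    · simp only [hc, if_false]
      rw [ih c (fronts ++ [c]) backs (by simp)]
      simp

-- ===== VERDICT (by name: the statement is the Claim_ definition above) =====
theorem solve_spec : Claim_equal_solve := by
  intro s _ hpre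
  unfold Spec_solve solve solve_alt
  have hne : s.toList ≠ [] := fun h => hpre (String.toList_eq_nil_iff.mp h)
  cases hl : s.toList with
  | nil => exact absurd hl hne
  | cons c rest =>
    simp only
    rw [solveCore_eq_goA, foldl_step_eq_goA rest c [c] [] (by simp)]
    simp
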